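-- pv_equiv track=rewrite | github.com/roemmele/answerquest | scripts/question_answering/newsqa/preprocessing.py | return_whitespace_tokens
-- ===== SOURCE A (Python) =====
-- def is_whitespace(c):
--     if c == " " or c == "\t" or c == "\r" or c == "\n" or ord(c) == 0x202F:
--         return True
--     return False
--
-- def return_whitespace_tokens(paragraph):
--     whitespace_tokens = []
--     char_to_word_offset = []
--
--     prev_is_whitespace = True
--     for c in paragraph:
--         if is_whitespace(c):
--             prev_is_whitespace = True
--         else:
--             if prev_is_whitespace:
--                 whitespace_tokens.append(c)
--             else:
--                 whitespace_tokens[-1] += c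
--             prev_is_whitespace = False
--         char_to_word_offset.append(len(whitespace_tokens) - 1)
--     return whitespace_tokens, char_to_word_offset
-- ===== SOURCE B (Python) =====
-- def is_whitespace(c):
--     if c == " " or c == "\t" or c == "\r" or c == "\n" or ord(c) == 0x202F:
--         return True
--     return False
--
-- def return_whitespace_tokens(paragraph):
--     tokens = []
--     char_to_word_offset = []
--     start = None  # index where the current non-whitespace run began, or None
--     for i, c in enumerate(paragraph):
--         if is_whitespace(c):
--             if start is not None:
--                 tokens.append(paragraph[start:i])
--                 start = None
--         else:
--             if start is None:
--                 start = i
--         char_to_word_offset.append(len(tokens) - 1 + (1 if start is not None else 0))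
--     if start is not None:
--         tokens.append(paragraph[start:])
--     return tokens, char_to_word_offset
-- ===== Notes on version B (the rewrite author's own statement) =====
-- stated objective: alternative
-- what changed: Replaces A's char-by-char token building (append/concat onto the last token, with a prev_is_whitespace flag) by a single pass that tracks the start index of the current non-whitespace run and emits each token once as a slice paragraph[start:i], recomputing the per-char offset from len(tokens) and whether a run is open.
import Mathlib
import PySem

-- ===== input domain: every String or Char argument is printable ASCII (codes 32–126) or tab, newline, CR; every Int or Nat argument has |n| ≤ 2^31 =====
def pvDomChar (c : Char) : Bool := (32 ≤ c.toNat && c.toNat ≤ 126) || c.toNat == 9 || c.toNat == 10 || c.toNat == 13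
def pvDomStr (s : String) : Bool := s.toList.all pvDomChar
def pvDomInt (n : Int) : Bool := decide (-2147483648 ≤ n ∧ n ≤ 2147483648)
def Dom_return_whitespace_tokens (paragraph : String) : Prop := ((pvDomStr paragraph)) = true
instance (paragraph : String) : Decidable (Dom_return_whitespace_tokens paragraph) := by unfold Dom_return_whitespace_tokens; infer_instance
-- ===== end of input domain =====

-- B replaces A's char-by-char token concatenation with a single pass that tracks the start
-- index of the current run and slices each token out once (objective: alternative decomposition).

-- ===== PORT A =====
def pvIsWhitespace (c : Char) : Bool :=
  c = ' ' || c = '\t' || c = '\r' || c = '\n' || c.toNat = 0x202F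

-- A's loop: tokens grown char-by-char; `whitespace_tokens[-1] += c` is dropLast ++ [last ++ [c]]
def pvALoop : List Char → List (List Char) → List Int → Bool → List (List Char) × List Int
  | [], toks, offs, _ => (toks, offs)
  | c :: rest, toks, offs, prev =>
      if pvIsWhitespace c then
        pvALoop rest toks (offs ++ [(toks.length : Int) - 1]) true
      else
        let toks' := if prev then toks ++ [[c]]
                     else toks.dropLast ++ [toks.getLastD [] ++ [c]]
        pvALoop rest toks' (offs ++ [(toks'.length : Int) - 1]) false

def return_whitespace_tokens (paragraph : String) : List String × List Int :=
  let r := pvALoop paragraph.toList [] [] true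
  (r.1.map String.ofList, r.2)

-- ===== PORT B =====
-- B's loop: `start` is the index where the current non-whitespace run began (None = no open run);
-- a token is emitted as the slice paragraph[start:i] when the run closes (paragraph[start:] at the end).
def pvBLoop (cs : List Char) : List Char → Nat → List (List Char) → List Int → Option Nat →
    List (List Char) × List Int
  | [], _, toks, offs, start =>
      match start with
      | some s => (toks ++ [PySem.List.slice cs (some (s : Int)) none], offs)
      | none => (toks, offs)
  | c :: rest, i, toks, offs, start =>
      let p : List (List Char) × Option Nat :=
        if pvIsWhitespace c then
          match start with
          | some s => (toks ++ [PySem.List.slice cs (some (s : Int)) (some (i : Int))], none)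
          | none => (toks, none)
        else
          match start with
          | none => (toks, some i)
          | some s => (toks, some s)
      pvBLoop cs rest (i + 1) p.1
        (offs ++ [(p.1.length : Int) - 1 + (if p.2.isSome then 1 else 0)]) p.2

def return_whitespace_tokens_alt (paragraph : String) : List String × List Int :=
  let cs := paragraph.toList
  let r := pvBLoop cs cs 0 [] [] none
  (r.1.map String.ofList, r.2)

-- ===== PRECONDITION & SPEC =====
def Spec_return_whitespace_tokens (paragraph : String) (out : List String × List Int) : Prop := out = return_whitespace_tokens_alt paragraph
instance (paragraph : String) (out : List String × List Int) : Decidable (Spec_return_whitespace_tokens paragraph out) := by unfold Spec_return_whitespace_tokens; infer_instance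

-- ===== CLAIM (what is proved, stated in full; the proofs are below) =====
def Claim_equal_return_whitespace_tokens : Prop := ∀ (paragraph : String), Dom_return_whitespace_tokens paragraph → Spec_return_whitespace_tokens paragraph (return_whitespace_tokens paragraph)

-- ===== LEMMAS AND PROOFS =====

-- the invariant tying A's state (toksA, prev) to B's state (toksB, start) at index i
def pvInv (cs : List Char) (i : Nat) (toksA toksB : List (List Char)) :
    Bool → Option Nat → Prop
  | true, none => toksA = toksB
  | false, some s => s < i ∧ toksA = toksB ++ [(cs.drop s).take (i - s)]
  | _, _ => False

lemma pv_loop_eq (cs : List Char) :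
    ∀ (rest : List Char) (i : Nat), rest = cs.drop i → i ≤ cs.length →
    ∀ (toksA toksB : List (List Char)) (offs : List Int) (prev : Bool) (start : Option Nat),
    pvInv cs i toksA toksB prev start →
    pvALoop rest toksA offs prev = pvBLoop cs rest i toksB offs start := by
  intro rest
  induction rest with
  | nil =>
    intro i hi hle toksA toksB offs prev start hinv
    have hlen : cs.length = i := by
      have := congrArg List.length hi
      simp [List.length_drop] at this; omega
    cases prev with
    | false =>
      cases start with
      | none => exact hinv.elim
      | some s =>
        obtain ⟨hs, htoks⟩ := hinv
        simp [pvALoop, pvBLoop, htoks, PySem.List.slice_from_natCast]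
        omega
    | true =>
      cases start with
      | some s => exact hinv.elim
      | none =>
        have htb : toksA = toksB := hinv
        simp [pvALoop, pvBLoop, htb]
  | cons c rest ih =>
    intro i hi hle toksA toksB offs prev start hinv
    have hget : cs[i]? = some c := by
      have : (cs.drop i)[0]? = some c := by rw [← hi]; simp
      simpa using this
    have hilt : i < cs.length := (List.getElem?_eq_some_iff.mp hget).1
    have hrest : rest = cs.drop (i + 1) := by
      rw [← List.tail_drop, ← hi]; rfl
    by_cases hw : pvIsWhitespace c = true
    · -- whitespace step: run (if any) closes; tokens agree afterwards
      cases prev with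
      | false =>
        cases start with
        | none => exact hinv.elim
        | some s =>
          obtain ⟨hs, htoks⟩ := hinv
          have hslice : PySem.List.slice cs (some (s : Int)) (some (i : Int)) =
              (cs.drop s).take (i - s) := PySem.List.slice_natCast cs s i
          simp only [pvALoop, pvBLoop, hw, if_pos]
          simp only [hslice]
          have hlen : toksA.length = toksB.length + 1 := by simp [htoks]
          have := ih (i + 1) hrest (by omega) toksA
            (toksB ++ [(cs.drop s).take (i - s)])
            (offs ++ [(toksA.length : Int) - 1]) true none
            (by show toksA = _; exact htoks)
          simpa [htoks, hlen] using this
      | true =>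
        cases start with
        | some s => exact hinv.elim
        | none =>
          have htb : toksA = toksB := hinv
          simp only [pvALoop, pvBLoop, hw, if_pos]
          have := ih (i + 1) hrest (by omega) toksA toksB
            (offs ++ [(toksA.length : Int) - 1]) true none
            (by show toksA = _; exact htb)
          simpa [htb] using this
    · -- non-whitespace step: run opens or extends
      cases prev with
      | false =>
        cases start with
        | none => exact hinv.elim
        | some s =>
          -- A extends the last token; B keeps the same start
          obtain ⟨hs, htoks⟩ := hinv
          have htake : (cs.drop s).take (i - s) ++ [c] = (cs.drop s).take (i + 1 - s) := by
            have h1 : i + 1 - s = (i - s) + 1 := by omega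
            rw [h1, List.take_add_one]
            have h2 : (cs.drop s)[i - s]? = some c := by
              rw [List.getElem?_drop]
              have h3 : s + (i - s) = i := by omega
              rw [h3]; exact hget
            simp [h2]
          simp only [pvALoop, pvBLoop, hw, if_neg, Bool.false_eq_true, not_false_iff]
          simp only [htoks, List.dropLast_concat, List.getLastD_concat]
          have := ih (i + 1) hrest (by omega) (toksB ++ [(cs.drop s).take (i - s) ++ [c]])
            toksB (offs ++ [((toksB ++ [(cs.drop s).take (i - s) ++ [c]]).length : Int) - 1])
            false (some s)
            (by show _ < _ ∧ _ = _; exact ⟨by omega, by rw [htake]⟩)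
          simpa using this
      | true =>
        cases start with
        | some s => exact hinv.elim
        | none =>
          -- A appends [c]; B opens a run at i
          have htb : toksA = toksB := hinv
          have htake : (cs.drop i).take 1 = [c] := by rw [← hi]; rfl
          simp only [pvALoop, pvBLoop, hw, if_neg, Bool.false_eq_true, not_false_iff]
          have := ih (i + 1) hrest (by omega) (toksA ++ [[c]]) toksA
            (offs ++ [((toksA ++ [[c]]).length : Int) - 1]) false (some i)
            (by show _ < _ ∧ _ = _
                exact ⟨by omega, by
                  have h1 : i + 1 - i = 1 := by omega
                  rw [h1, htake]⟩)
          simpa [htb] using this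

-- ===== VERDICT (by name: the statement is the Claim_ definition above) =====
theorem return_whitespace_tokens_spec : Claim_equal_return_whitespace_tokens := by
  intro paragraph _
  unfold Spec_return_whitespace_tokens return_whitespace_tokens return_whitespace_tokens_alt
  rw [pv_loop_eq paragraph.toList paragraph.toList 0 (by simp) (by simp) [] [] [] true none
    (by simp [pvInv])]
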